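-- pv_equiv track=rewrite | github.com/Maraljan/my_project_in_Selenium | study.py | get_from_database
-- ===== SOURCE A (Python) =====
-- database = {
--     'vova': '1',
--     'maral': '1',
--     'mahru': '2',
--     'bater': '2',
-- }
--
-- def get_from_database(where, default=None):
--
--     default = default or []
--
--     people = []
--     for name, value in database.items():
--         if value == where:
--             people.append(name)
--     if people:
--         return people
--     return default
-- ===== SOURCE B (Python) =====
-- database = {
--     'vova': '1',
--     'maral': '1',
--     'mahru': '2',
--     'bater': '2',
-- }
--
--
-- def _build_index():
--     index = {}
--     for name, value in database.items():
--         index.setdefault(value, []).append(name)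
--     return index
--
--
-- def get_from_database(where, default=None):
--     index = _build_index()
--     people = index.get(where)
--     if people:
--         return people
--     return default or []
-- ===== Notes on version B (the rewrite author's own statement) =====
-- stated objective: alternative
-- what changed: B builds a reverse index value->list-of-names in one grouping pass and answers by a single dictionary lookup, instead of filtering the items list against the query.
import Mathlib
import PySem

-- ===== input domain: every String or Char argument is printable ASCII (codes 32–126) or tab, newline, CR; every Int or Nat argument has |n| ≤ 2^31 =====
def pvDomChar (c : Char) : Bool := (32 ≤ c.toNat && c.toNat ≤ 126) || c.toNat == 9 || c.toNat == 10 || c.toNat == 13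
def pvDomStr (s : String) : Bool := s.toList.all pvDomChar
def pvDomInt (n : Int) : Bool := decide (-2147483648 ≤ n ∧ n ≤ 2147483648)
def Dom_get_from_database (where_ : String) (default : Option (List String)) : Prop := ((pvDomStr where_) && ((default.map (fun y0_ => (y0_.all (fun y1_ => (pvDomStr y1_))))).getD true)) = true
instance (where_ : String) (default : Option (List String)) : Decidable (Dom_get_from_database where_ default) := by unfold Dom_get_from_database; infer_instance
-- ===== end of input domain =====

-- B replaces the filter-the-items loop with a reverse index (value -> names) built by one
-- grouping pass and a single dictionary lookup; objective: alternative decomposition.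

-- ===== PORT A =====
def pvDatabase : List (String × String) :=
  [("vova", "1"), ("maral", "1"), ("mahru", "2"), ("bater", "2")]

-- `default = default or []` : None or an empty list becomes []
def pvOrNil (default : Option (List String)) : List String :=
  match default with
  | some d => if d.isEmpty then [] else d
  | none => []

def get_from_database (where_ : String) (default : Option (List String)) : List String :=
  let default := pvOrNil default
  let people := pvDatabase.foldl
    (fun acc nv => if nv.2 == where_ then acc ++ [nv.1] else acc) []
  if !people.isEmpty then people else default

-- ===== PORT B =====
-- _build_index: index.setdefault(value, []).append(name)
def pvIndexB : PySem.Dict String (List String) :=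
  pvDatabase.foldl (fun idx nv => idx.modify nv.2 [] (· ++ [nv.1])) PySem.Dict.empty

def get_from_database_alt (where_ : String) (default : Option (List String)) : List String :=
  match pvIndexB.get? where_ with
  | some people => if !people.isEmpty then people else pvOrNil default
  | none => pvOrNil default

-- ===== PRECONDITION & SPEC =====
def Spec_get_from_database (where_ : String) (default : Option (List String)) (out : List String) : Prop := out = get_from_database_alt where_ default
instance (where_ : String) (default : Option (List String)) (out : List String) : Decidable (Spec_get_from_database where_ default out) := by unfold Spec_get_from_database; infer_instance

-- ===== CLAIM (what is proved, stated in full; the proofs are below) =====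
def Claim_equal_get_from_database : Prop := ∀ (where_ : String) (default : Option (List String)), Dom_get_from_database where_ default → Spec_get_from_database where_ default (get_from_database where_ default)

-- ===== LEMMAS AND PROOFS =====

theorem pvIndexB_eval :
    pvIndexB = PySem.Dict.mk [("1", ["vova", "maral"]), ("2", ["mahru", "bater"])] := by
  decide

-- ===== VERDICT (by name: the statement is the Claim_ definition above) =====
theorem get_from_database_spec : Claim_equal_get_from_database := by
  intro w d _
  unfold Spec_get_from_database get_from_database get_from_database_alt
  rw [pvIndexB_eval]
  by_cases h1 : "1" = w
  · subst h1; simp [pvDatabase, List.foldl, PySem.Dict.get?_mk_cons]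
  · by_cases h2 : "2" = w
    · subst h2; simp [pvDatabase, List.foldl, PySem.Dict.get?_mk_cons]
    · simp [pvDatabase, List.foldl, PySem.Dict.get?, h1, h2]
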